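-- pv_equiv track=rewrite | github.com/muhanurozulgyuyo/coding-test | 프로그래머스/0/120837. 개미 군단/개미 군단.py | solution
-- ===== SOURCE A (Python) =====
-- def solution(hp):
--     answer = 0
--     while hp > 0:
--         if hp >= 5:
--             answer += hp // 5
--             hp -= (hp // 5) * 5
--         elif hp >= 3:
--             answer += hp // 3
--             hp -= (hp // 3) * 3
--         elif hp >= 1:
--             answer += hp // 1
--             hp -= (hp // 1) * 1
--     return answer
-- ===== SOURCE B (Python) =====
-- def solution(hp):
--     if hp <= 0:
--         return 0
--     return hp // 5 + (hp % 5) // 3 + (hp % 5) % 3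
-- ===== Notes on version B (the rewrite author's own statement) =====
-- stated objective: simpler
-- what changed: Replaced the while-loop greedy reduction with a single closed-form arithmetic expression of quotients and remainders of hp, guarded for non-positive hp.
import Mathlib
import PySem

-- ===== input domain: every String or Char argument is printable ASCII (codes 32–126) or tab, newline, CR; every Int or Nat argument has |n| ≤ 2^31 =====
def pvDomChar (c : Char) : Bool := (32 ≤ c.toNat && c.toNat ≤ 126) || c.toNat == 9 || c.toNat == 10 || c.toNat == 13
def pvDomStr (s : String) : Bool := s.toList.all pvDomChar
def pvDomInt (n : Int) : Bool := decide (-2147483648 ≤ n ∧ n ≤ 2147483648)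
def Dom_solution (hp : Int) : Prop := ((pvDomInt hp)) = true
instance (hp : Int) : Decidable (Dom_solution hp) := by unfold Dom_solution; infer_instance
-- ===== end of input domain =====

-- B replaces A's while-loop greedy reduction by one closed-form expression (objective: simpler).
-- ===== PORT A =====
-- the while loop terminates in at most 3 iterations; fuel 4 is a totality guard only
def solutionLoop : Nat → Int → Int → Int
  | 0, _, answer => answer
  | fuel + 1, hp, answer =>
    if hp > 0 then
      if hp ≥ 5 then
        solutionLoop fuel (hp - (PySem.Int.floordiv hp 5) * 5) (answer + PySem.Int.floordiv hp 5)
      else if hp ≥ 3 then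
        solutionLoop fuel (hp - (PySem.Int.floordiv hp 3) * 3) (answer + PySem.Int.floordiv hp 3)
      else if hp ≥ 1 then
        solutionLoop fuel (hp - (PySem.Int.floordiv hp 1) * 1) (answer + PySem.Int.floordiv hp 1)
      else
        solutionLoop fuel hp answer
    else answer

def solution (hp : Int) : Int := solutionLoop 4 hp 0

-- ===== PORT B =====
def solution_alt (hp : Int) : Int :=
  if hp ≤ 0 then 0
  else PySem.Int.floordiv hp 5 + PySem.Int.floordiv (PySem.Int.mod hp 5) 3
       + PySem.Int.mod (PySem.Int.mod hp 5) 3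

-- ===== PRECONDITION & SPEC =====
def Spec_solution (hp : Int) (out : Int) : Prop := out = solution_alt hp
instance (hp : Int) (out : Int) : Decidable (Spec_solution hp out) := by unfold Spec_solution; infer_instance

-- ===== CLAIM (what is proved, stated in full; the proofs are below) =====
def Claim_equal_solution : Prop := ∀ (hp : Int), Dom_solution hp → Spec_solution hp (solution hp)

-- ===== LEMMAS AND PROOFS =====
theorem loop_nonpos (f : Nat) (hp a : Int) (h : ¬ hp > 0) : solutionLoop f hp a = a := by
  cases f <;> simp [solutionLoop, h]

theorem loop_small (f : Nat) (hp a : Int) (h1 : 0 < hp) (h2 : hp < 3) (hf : 1 ≤ f) :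
    solutionLoop f hp a = a + hp := by
  obtain ⟨f', rfl⟩ : ∃ f', f = f' + 1 := ⟨f - 1, by omega⟩
  show (if hp > 0 then _ else a) = a + hp
  rw [if_pos h1, if_neg (by omega : ¬ hp ≥ 5), if_neg (by omega : ¬ hp ≥ 3),
    if_pos (by omega : hp ≥ 1)]
  rw [PySem.Int.floordiv_eq_ediv_of_pos (by norm_num)]
  rw [loop_nonpos _ _ _ (by omega)]
  omega

theorem loop_mid (f : Nat) (hp a : Int) (h1 : 0 < hp) (h2 : hp < 5) (hf : 2 ≤ f) :
    solutionLoop f hp a = a + hp / 3 + hp % 3 := by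
  by_cases h3 : hp ≥ 3
  · obtain ⟨f', rfl⟩ : ∃ f', f = f' + 1 := ⟨f - 1, by omega⟩
    show (if hp > 0 then _ else a) = _
    rw [if_pos h1, if_neg (by omega : ¬ hp ≥ 5), if_pos h3]
    rw [PySem.Int.floordiv_eq_ediv_of_pos (by norm_num)]
    by_cases hz : hp - hp / 3 * 3 > 0
    · rw [loop_small _ _ _ (by omega) (by omega) (by omega)]; omega
    · rw [loop_nonpos _ _ _ hz]; omega
  · rw [loop_small _ _ _ h1 (by omega) (by omega)]; omega

-- ===== VERDICT (by name: the statement is the Claim_ definition above) =====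
theorem solution_spec : Claim_equal_solution := by
  intro hp _
  unfold Spec_solution solution solution_alt
  by_cases h0 : hp ≤ 0
  · rw [loop_nonpos _ _ _ (by omega), if_pos h0]
  · rw [if_neg h0]
    rw [PySem.Int.floordiv_eq_ediv_of_pos (by norm_num : (0:Int) < 5),
      PySem.Int.mod_eq_emod_of_pos (by norm_num : (0:Int) < 5),
      PySem.Int.floordiv_eq_ediv_of_pos (by norm_num : (0:Int) < 3),
      PySem.Int.mod_eq_emod_of_pos (by norm_num : (0:Int) < 3)]
    by_cases h5 : hp ≥ 5
    · show (if hp > 0 then _ else (0:Int)) = _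
      rw [if_pos (by omega : hp > 0), if_pos h5]
      rw [PySem.Int.floordiv_eq_ediv_of_pos (by norm_num)]
      by_cases hz : hp - hp / 5 * 5 > 0
      · rw [loop_mid 3 (hp - hp / 5 * 5) (0 + hp / 5) (by omega) (by omega) (by omega)]; omega
      · rw [loop_nonpos _ _ _ hz]; omega
    · rw [loop_mid 4 hp 0 (by omega) (by omega) (by omega)]; omega
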